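-- pv_equiv track=rewrite | github.com/1000Rym/CodeSkillUp | coding_test/coding_test_with_python/search/q20_avoid_detaction.py | solution
-- ===== SOURCE A (Python) =====
-- from itertools import combinations
--
-- WALL_COUNT = 3
--
-- def solution(teachers, students, spaces):
--     wall_set = combinations(spaces, WALL_COUNT)
--
--     for walls in wall_set:
--         blocks = []
--         for s_x, s_y in students:
--             for t_x, t_y in teachers:
--                 if s_x == t_x:
--                     blocked = False
--                     for _, w_y in walls:
--                         if  min((s_y, t_y)) < w_y < max((s_y,t_y)):
--                             blocked = True
--                     blocks.append(blocked)
--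
--                 if s_y == t_y:
--                     blocked = False
--                     for w_x, _ in walls:
--                         if  min((s_x, t_x)) < w_x < max((s_x,t_x)):
--                             blocked = True
--                     blocks.append(blocked)
--
--         if all(blocks) : return True
--
--     return False
-- ===== SOURCE B (Python) =====
-- def solution(teachers, students, spaces):
--     # Build the interval constraints once (one per axis-aligned student/teacher pair).
--     constraints = []
--     for s_x, s_y in students:
--         for t_x, t_y in teachers:
--             if s_x == t_x:
--                 constraints.append((min(s_y, t_y), max(s_y, t_y), 1))
--             if s_y == t_y:
--                 constraints.append((min(s_x, t_x), max(s_x, t_x), 0))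
--     # Coverage mask per candidate wall: which constraints that wall alone blocks.
--     masks = [[lo < w[ax] < hi for lo, hi, ax in constraints] for w in spaces]
--     # Recursive set-cover search: pick k masks whose union with acc covers everything,
--     # with early success as soon as acc already covers all constraints.
--     def pick(ms, k, acc):
--         if all(acc) and k <= len(ms):
--             return True
--         if k == 0:
--             return all(acc)
--         if len(ms) < k:
--             return False
--         return pick(ms[1:], k - 1, [a or b for a, b in zip(acc, ms[0])]) or pick(ms[1:], k, acc)
--     return pick(masks, 3, [False] * len(constraints))
-- ===== Notes on version B (the rewrite author's own statement) =====
-- stated objective: faster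
-- what changed: B reduces the geometric problem once to per-wall boolean coverage masks over the precomputed sightline constraints and then runs a recursive set-cover search (pick/skip with early success when the accumulated union already covers everything), instead of re-running the interval tests over students x teachers for every 3-wall combination.
import Mathlib
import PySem

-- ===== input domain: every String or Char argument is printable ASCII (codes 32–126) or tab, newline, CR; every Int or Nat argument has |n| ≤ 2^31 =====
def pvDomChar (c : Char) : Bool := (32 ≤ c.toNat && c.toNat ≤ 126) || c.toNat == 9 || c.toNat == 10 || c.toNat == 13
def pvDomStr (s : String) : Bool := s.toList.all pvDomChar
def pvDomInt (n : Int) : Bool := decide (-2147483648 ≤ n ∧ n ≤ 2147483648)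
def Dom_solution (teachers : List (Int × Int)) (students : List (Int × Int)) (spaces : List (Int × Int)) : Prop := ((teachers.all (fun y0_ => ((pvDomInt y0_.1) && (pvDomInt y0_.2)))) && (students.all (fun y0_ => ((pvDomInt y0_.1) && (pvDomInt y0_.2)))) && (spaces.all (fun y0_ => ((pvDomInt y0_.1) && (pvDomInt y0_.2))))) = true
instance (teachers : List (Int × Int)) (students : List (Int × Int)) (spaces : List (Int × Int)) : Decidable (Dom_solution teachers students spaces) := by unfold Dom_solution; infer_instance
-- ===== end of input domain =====

-- B replaces the per-combination geometric re-testing by precomputed per-wall coverage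
-- masks and a recursive set-cover search with early success; return value only.

-- ===== PORT A =====
-- itertools.combinations(xs, k) in itertools order
def combosK {α : Type} (k : Nat) (xs : List α) : List (List α) :=
  match k, xs with
  | 0, _ => [[]]
  | _ + 1, [] => []
  | k + 1, x :: rest => (combosK k rest).map (fun c => x :: c) ++ combosK (k + 1) rest

-- inner 'for _, w_y in walls' loop setting blocked
def wallBlockY (walls : List (Int × Int)) (a b : Int) : Bool :=
  walls.foldl (fun blocked w => if min a b < w.2 ∧ w.2 < max a b then true else blocked) false

def wallBlockX (walls : List (Int × Int)) (a b : Int) : Bool :=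
  walls.foldl (fun blocked w => if min a b < w.1 ∧ w.1 < max a b then true else blocked) false

-- the students×teachers double loop building 'blocks'
def blocksOf (teachers students walls : List (Int × Int)) : List Bool :=
  students.foldl (fun acc s =>
    teachers.foldl (fun acc t =>
      let acc := if s.1 = t.1 then acc ++ [wallBlockY walls s.2 t.2] else acc
      if s.2 = t.2 then acc ++ [wallBlockX walls s.1 t.1] else acc) acc) []

def solLoopA (teachers students : List (Int × Int)) : List (List (Int × Int)) → Bool
  | [] => false
  | walls :: rest =>
    if (blocksOf teachers students walls).all (fun b => b) then true
    else solLoopA teachers students rest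

def solution (teachers : List (Int × Int)) (students : List (Int × Int)) (spaces : List (Int × Int)) : Bool :=
  solLoopA teachers students (combosK 3 spaces)

-- ===== PORT B =====
-- constraints built once: (lo, hi, axis) with axis = true for y
def constraintsOf (teachers students : List (Int × Int)) : List (Int × Int × Bool) :=
  students.foldl (fun acc s =>
    teachers.foldl (fun acc t =>
      let acc := if s.1 = t.1 then acc ++ [(min s.2 t.2, max s.2 t.2, true)] else acc
      if s.2 = t.2 then acc ++ [(min s.1 t.1, max s.1 t.1, false)] else acc) acc) []

-- whether wall w alone blocks constraint c
def covers (w : Int × Int) (c : Int × Int × Bool) : Bool :=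
  decide (c.1 < (if c.2.2 then w.2 else w.1) ∧ (if c.2.2 then w.2 else w.1) < c.2.1)

def maskOf (cs : List (Int × Int × Bool)) (w : Int × Int) : List Bool :=
  cs.map (fun c => covers w c)

def orMask (a b : List Bool) : List Bool := List.zipWith (· || ·) a b

def pick : List (List Bool) → Nat → List Bool → Bool
  | ms, k, acc =>
    if acc.all id && decide (k ≤ ms.length) then true
    else if k = 0 then acc.all id
    else if ms.length < k then false
    else
      match ms with
      | [] => false
      | m :: rest => pick rest (k - 1) (orMask acc m) || pick rest k acc

def solution_alt (teachers : List (Int × Int)) (students : List (Int × Int)) (spaces : List (Int × Int)) : Bool :=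
  pick (spaces.map (maskOf (constraintsOf teachers students))) 3
    (List.replicate (constraintsOf teachers students).length false)

-- ===== PRECONDITION & SPEC =====
def Spec_solution (teachers : List (Int × Int)) (students : List (Int × Int)) (spaces : List (Int × Int)) (out : Bool) : Prop := out = solution_alt teachers students spaces
instance (teachers : List (Int × Int)) (students : List (Int × Int)) (spaces : List (Int × Int)) (out : Bool) : Decidable (Spec_solution teachers students spaces out) := by unfold Spec_solution; infer_instance

-- ===== CLAIM (what is proved, stated in full; the proofs are below) =====
def Claim_equal_solution : Prop := ∀ (teachers : List (Int × Int)) (students : List (Int × Int)) (spaces : List (Int × Int)), Dom_solution teachers students spaces → Spec_solution teachers students spaces (solution teachers students spaces)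

-- ===== LEMMAS AND PROOFS =====

-- proof-side: a constraint is satisfied by a wall set
def satisfied (walls : List (Int × Int)) (c : Int × Int × Bool) : Bool :=
  walls.any (fun w => covers w c)

theorem foldl_if_true_any {α : Type} (p : α → Prop) [DecidablePred p] :
    ∀ (xs : List α) (b : Bool),
      xs.foldl (fun acc x => if p x then true else acc) b
        = (b || xs.any (fun x => decide (p x))) := by
  intro xs
  induction xs with
  | nil => intro b; simp [List.foldl]
  | cons x xs ih =>
    intro b
    simp only [List.foldl, List.any_cons]
    rw [ih]
    by_cases h : p x <;> simp [h]

theorem wallBlockY_eq (walls : List (Int × Int)) (a b : Int) :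
    wallBlockY walls a b = satisfied walls (min a b, max a b, true) := by
  unfold wallBlockY satisfied covers
  rw [foldl_if_true_any (fun w : Int × Int => min a b < w.2 ∧ w.2 < max a b)]
  simp

theorem wallBlockX_eq (walls : List (Int × Int)) (a b : Int) :
    wallBlockX walls a b = satisfied walls (min a b, max a b, false) := by
  unfold wallBlockX satisfied covers
  rw [foldl_if_true_any (fun w : Int × Int => min a b < w.1 ∧ w.1 < max a b)]
  simp

theorem inner_eq (walls : List (Int × Int)) (s : Int × Int) :
    ∀ (ts : List (Int × Int)) (accB : List Bool) (accC : List (Int × Int × Bool)),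
      accB = accC.map (satisfied walls) →
      ts.foldl (fun acc t =>
          let acc := if s.1 = t.1 then acc ++ [wallBlockY walls s.2 t.2] else acc
          if s.2 = t.2 then acc ++ [wallBlockX walls s.1 t.1] else acc) accB
        = (ts.foldl (fun acc t =>
            let acc := if s.1 = t.1 then acc ++ [(min s.2 t.2, max s.2 t.2, true)] else acc
            if s.2 = t.2 then acc ++ [(min s.1 t.1, max s.1 t.1, false)] else acc) accC).map
            (satisfied walls) := by
  intro ts
  induction ts with
  | nil => intro accB accC h; simpa using h
  | cons t ts ih =>
    intro accB accC h
    simp only [List.foldl]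
    apply ih
    by_cases h1 : s.1 = t.1 <;> by_cases h2 : s.2 = t.2 <;>
      simp [h1, h2, h, wallBlockY_eq, wallBlockX_eq]

theorem outer_eq (walls teachers : List (Int × Int)) :
    ∀ (ss : List (Int × Int)) (accB : List Bool) (accC : List (Int × Int × Bool)),
      accB = accC.map (satisfied walls) →
      ss.foldl (fun acc s =>
          teachers.foldl (fun acc t =>
            let acc := if s.1 = t.1 then acc ++ [wallBlockY walls s.2 t.2] else acc
            if s.2 = t.2 then acc ++ [wallBlockX walls s.1 t.1] else acc) acc) accB
        = (ss.foldl (fun acc s =>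
            teachers.foldl (fun acc t =>
              let acc := if s.1 = t.1 then acc ++ [(min s.2 t.2, max s.2 t.2, true)] else acc
              if s.2 = t.2 then acc ++ [(min s.1 t.1, max s.1 t.1, false)] else acc) acc) accC).map
            (satisfied walls) := by
  intro ss
  induction ss with
  | nil => intro accB accC h; simpa using h
  | cons s ss ih =>
    intro accB accC h
    simp only [List.foldl]
    exact ih _ _ (inner_eq walls s teachers accB accC h)

theorem blocksOf_eq (teachers students walls : List (Int × Int)) :
    blocksOf teachers students walls
      = (constraintsOf teachers students).map (satisfied walls) := by
  unfold blocksOf constraintsOf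
  exact outer_eq walls teachers students [] [] rfl

-- A's loop is an any over the combination list
theorem solLoopA_eq_any (teachers students : List (Int × Int)) :
    ∀ (csl : List (List (Int × Int))),
      solLoopA teachers students csl
        = csl.any (fun walls => (blocksOf teachers students walls).all (fun b => b)) := by
  intro csl
  induction csl with
  | nil => rfl
  | cons walls rest ih =>
    simp only [solLoopA, List.any_cons, ih]
    by_cases h : (blocksOf teachers students walls).all (fun b => b) = true <;> simp [h]

-- zipWith-or of two maps over the same list
theorem orMask_map (cs : List (Int × Int × Bool)) (f g : (Int × Int × Bool) → Bool) :
    orMask (cs.map f) (cs.map g) = cs.map (fun c => f c || g c) := by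
  unfold orMask
  induction cs with
  | nil => rfl
  | cons c cs ih => simp [ih]

-- folding masks of a wall list unions pointwise
theorem fold_orMask_eq (cs : List (Int × Int × Bool)) :
    ∀ (walls : List (Int × Int)) (g : (Int × Int × Bool) → Bool),
      walls.foldl (fun a w => orMask a (maskOf cs w)) (cs.map g)
        = cs.map (fun c => g c || satisfied walls c) := by
  intro walls
  induction walls with
  | nil => intro g; simp [satisfied]
  | cons w walls ih =>
    intro g
    rw [List.foldl_cons,
        show orMask (cs.map g) (maskOf cs w) = cs.map (fun c => g c || covers w c) by
          rw [maskOf, orMask_map],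
        ih]
    apply List.map_congr_left
    intro c _
    simp [satisfied, List.any_cons, Bool.or_assoc]

theorem orMask_length (a b : List Bool) (h : b.length = a.length) :
    (orMask a b).length = a.length := by
  simp [orMask, h]

theorem orMask_all : ∀ (a b : List Bool), a.all id = true → (orMask a b).all id = true := by
  intro a
  induction a with
  | nil => intro b _; simp [orMask]
  | cons x xs ih =>
    intro b h
    cases b with
    | nil => simp [orMask]
    | cons y ys =>
      simp only [List.all_cons, Bool.and_eq_true] at h
      simp only [orMask, List.zipWith_cons_cons, List.all_cons, Bool.and_eq_true]
      refine ⟨?_, ih ys h.2⟩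
      have hx : x = true := by simpa using h.1
      simp [hx]

theorem combosK_ne_nil {α : Type} :
    ∀ (xs : List α) (k : Nat), k ≤ xs.length → combosK k xs ≠ [] := by
  intro xs
  induction xs with
  | nil =>
    intro k h
    cases k with
    | zero => simp [combosK]
    | succ k => simp at h
  | cons x rest ih =>
    intro k h
    cases k with
    | zero => simp [combosK]
    | succ k =>
      simp only [combosK]
      intro hc
      have h1 := (List.append_eq_nil_iff.mp hc).1
      exact ih k (Nat.le_of_succ_le_succ h) (List.map_eq_nil_iff.mp h1)

theorem combosK_eq_nil {α : Type} :
    ∀ (xs : List α) (k : Nat), xs.length < k → combosK k xs = [] := by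
  intro xs
  induction xs with
  | nil =>
    intro k h
    cases k with
    | zero => omega
    | succ k => rfl
  | cons x rest ih =>
    intro k h
    cases k with
    | zero => simp at h
    | succ k =>
      simp only [combosK]
      rw [ih k (by simp at h; omega), ih (k + 1) (by simp at h; omega)]
      simp

theorem combosK_mem_sub {α : Type} :
    ∀ (xs : List α) (k : Nat) (c : List α), c ∈ combosK k xs → ∀ m ∈ c, m ∈ xs := by
  intro xs
  induction xs with
  | nil =>
    intro k c hc
    cases k with
    | zero => simp [combosK] at hc; simp [hc]
    | succ k => simp [combosK] at hc
  | cons x rest ih =>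
    intro k c hc
    cases k with
    | zero => simp [combosK] at hc; simp [hc]
    | succ k =>
      simp only [combosK, List.mem_append, List.mem_map] at hc
      rcases hc with ⟨c', hc', rfl⟩ | hc
      · intro m hm
        rcases List.mem_cons.mp hm with rfl | hm
        · exact List.mem_cons_self
        · exact List.mem_cons_of_mem _ (ih k c' hc' m hm)
      · intro m hm; exact List.mem_cons_of_mem _ (ih (k + 1) c hc m hm)

theorem combosK_map {α β : Type} (f : α → β) :
    ∀ (xs : List α) (k : Nat),
      combosK k (xs.map f) = (combosK k xs).map (List.map f) := by
  intro xs
  induction xs with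
  | nil =>
    intro k
    cases k with
    | zero => rfl
    | succ k => rfl
  | cons x rest ih =>
    intro k
    cases k with
    | zero => rfl
    | succ k =>
      simp only [List.map_cons, combosK, ih k, ih (k + 1),
        List.map_append, List.map_map]
      simp [Function.comp_def]

-- folding a combo of equal-length masks keeps the length and, from an all-true acc, all-true
theorem fold_combo_all (c : List (List Bool)) (acc : List Bool)
    (hlen : ∀ m ∈ c, m.length = acc.length) (hall : acc.all id = true) :
    (c.foldl orMask acc).all id = true := by
  induction c generalizing acc with
  | nil => simpa using hall
  | cons m rest ih =>
    simp only [List.foldl]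
    apply ih
    · intro m' hm'
      rw [orMask_length acc m (hlen m List.mem_cons_self)]
      exact hlen m' (List.mem_cons_of_mem _ hm')
    · exact orMask_all acc m hall

-- the characterisation of B's recursive set-cover search
theorem pick_eq_any :
    ∀ (ms : List (List Bool)) (k : Nat) (acc : List Bool),
      (∀ m ∈ ms, m.length = acc.length) →
      pick ms k acc = (combosK k ms).any (fun c => (c.foldl orMask acc).all id) := by
  intro ms
  induction ms with
  | nil =>
    intro k acc _
    cases k with
    | zero => simp [pick, combosK]
    | succ k => simp [pick, combosK]
  | cons m rest ih =>
    intro k acc hlen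
    rw [pick]
    by_cases h1 : (acc.all id && decide (k ≤ (m :: rest).length)) = true
    · rw [if_pos h1]
      have h1' : acc.all id = true ∧ k ≤ (m :: rest).length := by simpa using h1
      rcases List.exists_mem_of_ne_nil _ (combosK_ne_nil (m :: rest) k h1'.2) with ⟨c, hc⟩
      symm
      rw [List.any_eq_true]
      refine ⟨c, hc, fold_combo_all c acc ?_ h1'.1⟩
      intro m' hm'
      exact hlen m' (combosK_mem_sub (m :: rest) k c hc m' hm')
    · rw [if_neg h1]
      cases k with
      | zero => simp [combosK]
      | succ k =>
        rw [if_neg (Nat.succ_ne_zero k)]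
        by_cases h2 : (m :: rest).length < k + 1
        · rw [if_pos h2, combosK_eq_nil (m :: rest) (k + 1) h2]
          rfl
        · rw [if_neg h2]
          have hrest : ∀ m' ∈ rest, m'.length = acc.length :=
            fun m' hm' => hlen m' (List.mem_cons_of_mem _ hm')
          have hrest' : ∀ m' ∈ rest, m'.length = (orMask acc m).length := by
            intro m' hm'
            rw [orMask_length acc m (hlen m List.mem_cons_self)]
            exact hrest m' hm'
          simp only [combosK, List.any_append, List.any_map, Nat.add_sub_cancel]
          rw [ih k (orMask acc m) hrest', ih (k + 1) acc hrest]
          simp [Function.comp_def, List.foldl_cons]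

-- ===== VERDICT (by name: the statement is the Claim_ definition above) =====
theorem solution_spec : Claim_equal_solution := by
  intro teachers students spaces _
  unfold Spec_solution solution solution_alt
  have hlen : ∀ m ∈ spaces.map (maskOf (constraintsOf teachers students)),
      m.length = (List.replicate (constraintsOf teachers students).length false).length := by
    intro m hm
    rcases List.mem_map.mp hm with ⟨w, _, rfl⟩
    simp [maskOf]
  rw [solLoopA_eq_any, pick_eq_any _ 3 _ hlen, combosK_map (maskOf (constraintsOf teachers students)),
    List.any_map]
  refine congrArg _ (funext fun walls => ?_)
  rw [blocksOf_eq, Function.comp_apply,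
    show (List.replicate (constraintsOf teachers students).length false)
        = (constraintsOf teachers students).map (fun _ => false) by simp,
    List.foldl_map, fold_orMask_eq]
  simp [List.all_map, Function.comp_def]
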